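-- pv_equiv track=rewrite | github.com/AIRI-Institute/al_nlp_feasible | active_learning/visualize/plot_figure.py | annotate_line
-- ===== SOURCE A (Python) =====
-- PRETRAINED_NAMES_MAPPING = {
--     "distilbert": "DistilBERT",
--     "bert-base": "BERT base",
--     "bert-large": "BERT large",
--     "google/electra-base-discriminator": "ELECTRA base",
--     "roberta-base": "RoBERTa base",
--     "roberta-large": "RoBERTa large",
--     "xlnet-base": "XLNet base",
--     "xlnet-large": "XLNet large",
--     "distilrobert": "DistilRoBERTa",
--     "microsoft/": "DeBERTa",
--     "facebook/bart-base": "BART base",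
--     "facebook/bart-large": "BART large",
-- }
--
-- AL_EXPERIMENT_TYPES_MAPPING = {
--     "one": {"cls": "LC", "ner": "MNLP", "abs-sum": "Seq. score"},
--     "asm": "A-S M",
--     "astm": "PLASM",
--     "plasm": "PLASM",
--     "full": "Full data",
-- }
--
-- def _sub_name(name):
--     for pretrained_name, mapping in PRETRAINED_NAMES_MAPPING.items():
--         if name.startswith(pretrained_name):
--             return mapping
--     return name
--
-- def _sub_al_experiment_type(name, task="cls"):
--     for al_exp_type, mapping in AL_EXPERIMENT_TYPES_MAPPING.items():
--         if name == al_exp_type: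
--             if isinstance(mapping, dict):
--                 return mapping[task]
--             return mapping
--     return name.title()
--
-- def annotate_line(columns_to_group_by, columns_to_substitute):
--     """
--     Function to generate automatic annotation for each line.
--     `transformations_list` will consist of triples
--     <initial_text, function_to_transform_value_in_this_column, idx_of_this_column>
--     """
--     transformations_list = []
--     if "id_experiment" in columns_to_group_by:
--         idx = columns_to_group_by.index("id_experiment")
--         transformations_list.append(["exp. ", None, idx])
--     if "metric_name" in columns_to_group_by:
--         idx = columns_to_group_by.index("metric_name")
--         transformations_list.append(["metric: ", None, idx])
--     if "al_type" in columns_to_group_by: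
--         idx = columns_to_group_by.index("al_type")
--         transformations_list.append(["", _sub_al_experiment_type, idx])
--     if "strategy" in columns_to_group_by:
--         idx = columns_to_group_by.index("strategy")
--         transformations_list.append(["strat. ", None, idx])
--     if "acquisition" in columns_to_group_by:
--         idx = columns_to_group_by.index("acquisition")
--         transformations_list.append(["acq. ", _sub_name, idx])
--     if "target" in columns_to_group_by:
--         idx = columns_to_group_by.index("target")
--         transformations_list.append(["succ. ", _sub_name, idx])
--     if "ups" in columns_to_group_by:
--         idx = columns_to_group_by.index("ups")
--         transformations_list.append(["", None, idx])
--     if "framework" in columns_to_group_by: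
--         idx = columns_to_group_by.index("framework")
--         transformations_list.append(["", None, idx])
--     if "deleted" in columns_to_group_by:
--         idx = columns_to_group_by.index("deleted")
--         transformations_list.append(["del. ", str, idx])
--
--     new_columns = []
--     for multicolumn in columns_to_substitute:
--         result = ""
--         for (pre_text, func, idx) in transformations_list:
--             text = func(multicolumn[idx]) if func is not None else multicolumn[idx]
--             result += pre_text + str(text) + ", "
--         result = result[:-2]  # Remove the last comma and space
--         new_columns.append(result)
--     return new_columns
-- ===== SOURCE B (Python) =====
-- PRETRAINED_NAMES_MAPPING = {
--     "distilbert": "DistilBERT",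
--     "bert-base": "BERT base",
--     "bert-large": "BERT large",
--     "google/electra-base-discriminator": "ELECTRA base",
--     "roberta-base": "RoBERTa base",
--     "roberta-large": "RoBERTa large",
--     "xlnet-base": "XLNet base",
--     "xlnet-large": "XLNet large",
--     "distilrobert": "DistilRoBERTa",
--     "microsoft/": "DeBERTa",
--     "facebook/bart-base": "BART base",
--     "facebook/bart-large": "BART large",
-- }
--
-- AL_EXPERIMENT_TYPES_MAPPING = {
--     "one": {"cls": "LC", "ner": "MNLP", "abs-sum": "Seq. score"},
--     "asm": "A-S M",
--     "astm": "PLASM",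
--     "plasm": "PLASM",
--     "full": "Full data",
-- }
--
-- def _sub_name(name):
--     for pretrained_name, mapping in PRETRAINED_NAMES_MAPPING.items():
--         if name.startswith(pretrained_name):
--             return mapping
--     return name
--
-- def _sub_al_experiment_type(name, task="cls"):
--     for al_exp_type, mapping in AL_EXPERIMENT_TYPES_MAPPING.items():
--         if name == al_exp_type:
--             if isinstance(mapping, dict):
--                 return mapping[task]
--             return mapping
--     return name.title()
--
-- # Ordered spec table: (column name, prefix text, transformation function) in A's branch order.
-- _SPEC = [
--     ("id_experiment", "exp. ", None),
--     ("metric_name", "metric: ", None),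
--     ("al_type", "", _sub_al_experiment_type),
--     ("strategy", "strat. ", None),
--     ("acquisition", "acq. ", _sub_name),
--     ("target", "succ. ", _sub_name),
--     ("ups", "", None),
--     ("framework", "", None),
--     ("deleted", "del. ", str),
-- ]
--
-- def annotate_line(columns_to_group_by, columns_to_substitute):
--     # Column-major: for each grouped spec column (outer loop), append that column's
--     # fragment to every row's accumulator; finally join each row's fragments.
--     fragments = [[] for _ in columns_to_substitute]
--     for col, pre, func in _SPEC:
--         if col in columns_to_group_by:
--             idx = columns_to_group_by.index(col)
--             for frags, row in zip(fragments, columns_to_substitute):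
--                 value = row[idx]
--                 frags.append(pre + str(func(value) if func is not None else value))
--     return [", ".join(frags) for frags in fragments]
-- ===== Notes on version B (the rewrite author's own statement) =====
-- stated objective: alternative
-- what changed: Replaces A's nine sequential if-blocks and row-major accumulate-then-trim loop with a column-major pass: an ordered spec table is traversed once in the outer loop, each present column appending its fragment to every row's accumulator, and each row is joined with ', ' at the end.
import Mathlib
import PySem

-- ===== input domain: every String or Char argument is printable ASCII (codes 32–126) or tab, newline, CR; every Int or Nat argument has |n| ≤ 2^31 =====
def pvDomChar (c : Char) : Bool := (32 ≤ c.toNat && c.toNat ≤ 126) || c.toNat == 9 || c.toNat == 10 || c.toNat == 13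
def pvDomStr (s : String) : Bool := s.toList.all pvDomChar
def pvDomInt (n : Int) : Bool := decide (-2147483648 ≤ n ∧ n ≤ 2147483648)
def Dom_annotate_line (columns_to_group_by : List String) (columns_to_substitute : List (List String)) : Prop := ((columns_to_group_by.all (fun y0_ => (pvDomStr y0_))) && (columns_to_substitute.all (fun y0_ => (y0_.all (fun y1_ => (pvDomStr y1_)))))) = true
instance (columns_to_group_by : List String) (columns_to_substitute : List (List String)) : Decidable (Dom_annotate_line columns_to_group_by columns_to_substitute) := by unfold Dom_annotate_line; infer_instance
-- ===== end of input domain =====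

-- B replaces A's nine sequential if-blocks and row-major accumulate-then-trim loop with a
-- column-major pass over one ordered spec table, joining each row's fragments at the end.

-- ===== shared helpers (A's and B's Python share _sub_name / _sub_al_experiment_type verbatim) =====
def pvPretrained : List (String × String) :=
  [("distilbert", "DistilBERT"), ("bert-base", "BERT base"), ("bert-large", "BERT large"),
   ("google/electra-base-discriminator", "ELECTRA base"), ("roberta-base", "RoBERTa base"),
   ("roberta-large", "RoBERTa large"), ("xlnet-base", "XLNet base"), ("xlnet-large", "XLNet large"),
   ("distilrobert", "DistilRoBERTa"), ("microsoft/", "DeBERTa"),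
   ("facebook/bart-base", "BART base"), ("facebook/bart-large", "BART large")]

-- _sub_name: first startswith match over the mapping, else the name itself
def pvSubNameGo (name : String) : List (String × String) → String
  | [] => name
  | (p, m) :: rest => if PySem.Str.startswith name p then m else pvSubNameGo name rest

def pvSubName (name : String) : String := pvSubNameGo name pvPretrained

-- str.title, hand-ported (exact on the ASCII domain: cased chars are exactly the letters):
-- a letter is uppercased after a non-letter, lowercased after a letter; others pass through.
def pvTitleGo (prev : Bool) : List Char → List Char
  | [] => []
  | c :: rest =>
      if PySem.Chars.isalpha c then
        (if prev then PySem.Chars.lowerChar c else PySem.Chars.upperChar c) :: pvTitleGo true rest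
      else c :: pvTitleGo false rest

-- _sub_al_experiment_type with its default task="cls" (the only way A calls it):
-- equality against each dict key in order, the "one" entry returning its "cls" value.
def pvSubAlType (name : String) : String :=
  if name = "one" then "LC"
  else if name = "asm" then "A-S M"
  else if name = "astm" then "PLASM"
  else if name = "plasm" then "PLASM"
  else if name = "full" then "Full data"
  else String.ofList (pvTitleGo false name.toList)

-- list.index on an element known to be present (both Pythons call it only under the membership guard)
def pvIdx (ctgb : List String) (c : String) : Nat := (PySem.List.index? ctgb c).getD 0

-- the value written for one transformation triple: func(row[idx]) if func is not None else row[idx];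
-- str(·) on a str is the identity, so A's outer str(text) adds nothing. Total form of row[idx]
-- (pyGetD): Pre_ excludes the out-of-range rows on which Python raises IndexError.
def pvText (f? : Option (String → String)) (row : List String) (idx : Nat) : String :=
  match f? with
  | some f => f (PySem.List.pyGetD row (idx : Int) "")
  | none => PySem.List.pyGetD row (idx : Int) ""

-- ===== PORT A =====
-- the nine sequential if-blocks building transformations_list
def pvTransA (ctgb : List String) : List (String × Option (String → String) × Nat) :=
  let t : List (String × Option (String → String) × Nat) := []
  let t := if "id_experiment" ∈ ctgb then t ++ [("exp. ", none, pvIdx ctgb "id_experiment")] else t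
  let t := if "metric_name" ∈ ctgb then t ++ [("metric: ", none, pvIdx ctgb "metric_name")] else t
  let t := if "al_type" ∈ ctgb then t ++ [("", some pvSubAlType, pvIdx ctgb "al_type")] else t
  let t := if "strategy" ∈ ctgb then t ++ [("strat. ", none, pvIdx ctgb "strategy")] else t
  let t := if "acquisition" ∈ ctgb then t ++ [("acq. ", some pvSubName, pvIdx ctgb "acquisition")] else t
  let t := if "target" ∈ ctgb then t ++ [("succ. ", some pvSubName, pvIdx ctgb "target")] else t
  let t := if "ups" ∈ ctgb then t ++ [("", none, pvIdx ctgb "ups")] else t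
  let t := if "framework" ∈ ctgb then t ++ [("", none, pvIdx ctgb "framework")] else t
  let t := if "deleted" ∈ ctgb then t ++ [("del. ", some id, pvIdx ctgb "deleted")] else t
  t

-- one line of A's row loop: the += accumulator over code-point lists, then result[:-2]
def pvLineA (ts : List (String × Option (String → String) × Nat)) (row : List String) : String :=
  String.ofList (PySem.List.slice
    (ts.foldl (fun r tr => r ++ tr.1.toList ++ (pvText tr.2.1 row tr.2.2).toList ++ [',', ' ']) [])
    none (some (-2)))

def annotate_line (columns_to_group_by : List String) (columns_to_substitute : List (List String)) : List String :=
  columns_to_substitute.map (pvLineA (pvTransA columns_to_group_by))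

-- ===== PORT B =====
-- the ordered spec table (column, prefix, func), in A's branch order
def pvSpec : List (String × String × Option (String → String)) :=
  [("id_experiment", "exp. ", none), ("metric_name", "metric: ", none),
   ("al_type", "", some pvSubAlType), ("strategy", "strat. ", none),
   ("acquisition", "acq. ", some pvSubName), ("target", "succ. ", some pvSubName),
   ("ups", "", none), ("framework", "", none), ("deleted", "del. ", some id)]

-- one fragment: pre + str(func(row[idx]) if func is not None else row[idx]), as code points
def pvFragB (pre : String) (f? : Option (String → String)) (idx : Nat) (row : List String) : List Char :=
  pre.toList ++ (pvText f? row idx).toList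

-- column-major: fold over the spec table, each present column appending its fragment to every
-- row's accumulator (zip of accumulators with rows); then ', '.join each row's fragments
def annotate_line_alt (columns_to_group_by : List String) (columns_to_substitute : List (List String)) : List String :=
  let fragments := pvSpec.foldl
    (fun (fragments : List (List (List Char))) s =>
      if s.1 ∈ columns_to_group_by then
        List.zipWith (fun frags row => frags ++ [pvFragB s.2.1 s.2.2 (pvIdx columns_to_group_by s.1) row])
          fragments columns_to_substitute
      else fragments)
    (columns_to_substitute.map (fun _ => []))
  fragments.map (fun frags => String.ofList (PySem.Chars.join [',', ' '] frags))

-- ===== PRECONDITION & SPEC =====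
-- Pre_ excludes exactly the inputs on which Python A raises IndexError: a row shorter than
-- needed for the index of some grouped special column.
def Pre_annotate_line (columns_to_group_by : List String) (columns_to_substitute : List (List String)) : Prop :=
  ∀ row ∈ columns_to_substitute,
    ∀ c ∈ ["id_experiment", "metric_name", "al_type", "strategy", "acquisition", "target", "ups", "framework", "deleted"],
      c ∈ columns_to_group_by → pvIdx columns_to_group_by c < row.length
instance (columns_to_group_by : List String) (columns_to_substitute : List (List String)) : Decidable (Pre_annotate_line columns_to_group_by columns_to_substitute) := by unfold Pre_annotate_line; infer_instance
def pvWitness_annotate_line : List String × List (List String) := (["al_type", "strategy"], [["one", "x"], ["hi there", "y"]])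

def Spec_annotate_line (columns_to_group_by : List String) (columns_to_substitute : List (List String)) (out : List String) : Prop := out = annotate_line_alt columns_to_group_by columns_to_substitute
instance (columns_to_group_by : List String) (columns_to_substitute : List (List String)) (out : List String) : Decidable (Spec_annotate_line columns_to_group_by columns_to_substitute out) := by unfold Spec_annotate_line; infer_instance

-- ===== CLAIM (what is proved, stated in full; the proofs are below) =====
def Claim_equal_annotate_line : Prop := ∀ (columns_to_group_by : List String) (columns_to_substitute : List (List String)), Dom_annotate_line columns_to_group_by columns_to_substitute → Pre_annotate_line columns_to_group_by columns_to_substitute → Spec_annotate_line columns_to_group_by columns_to_substitute (annotate_line columns_to_group_by columns_to_substitute)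

-- ===== LEMMAS AND PROOFS =====

-- a guarded append, and a filterMap with an if-guard, as one conditional block each
lemma pvStep_eq {T : Type} (t : List T) (c : Prop) [Decidable c] (x : T) :
    (if c then t ++ [x] else t) = t ++ (if c then [x] else []) := by split_ifs <;> simp

lemma pvFm_ite {T U : Type} {P : T → Prop} [DecidablePred P] {h : T → U} (l : List T) :
    List.filterMap (fun s => if P s then some (h s) else none) l
      = l.flatMap (fun s => if P s then [h s] else []) := by
  induction l with
  | nil => rfl
  | cons a l ih => rw [List.filterMap_cons]; split_ifs with hc <;> simp [hc, ih]

-- A's transformations_list is the filtered spec table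
def pvTransB (ctgb : List String) : List (String × Option (String → String) × Nat) :=
  pvSpec.filterMap (fun s => if s.1 ∈ ctgb then some (s.2.1, s.2.2, pvIdx ctgb s.1) else none)

lemma pvTrans_eq (ctgb : List String) : pvTransA ctgb = pvTransB ctgb := by
  simp only [pvTransA, pvTransB, pvSpec, pvStep_eq]
  rw [pvFm_ite]
  simp [List.append_assoc]

-- zipping a mapped list with its source applies the step pointwise
lemma pvZip_map_self {A B : Type} (g : A → B) (f : B → A → B) (l : List A) :
    List.zipWith (fun p row => f p row) (l.map g) l = l.map (fun row => f (g row) row) := by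
  induction l with
  | nil => rfl
  | cons a l ih => simp only [List.map_cons, List.zipWith_cons_cons, ih]

-- B's column-major fold, characterised row by row: starting from any per-row state cts.map g,
-- folding a spec list ts appends to each row exactly the fragments of its filtered triples.
lemma pvFold_eq (ctgb : List String) (cts : List (List String))
    (ts : List (String × String × Option (String → String))) (g : List String → List (List Char)) :
    ts.foldl
      (fun (fragments : List (List (List Char))) s =>
        if s.1 ∈ ctgb then
          List.zipWith (fun frags row => frags ++ [pvFragB s.2.1 s.2.2 (pvIdx ctgb s.1) row])
            fragments cts
        else fragments)
      (cts.map g)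
      = cts.map (fun row => g row ++
          (ts.filterMap (fun s => if s.1 ∈ ctgb then some (s.2.1, s.2.2, pvIdx ctgb s.1) else none)).map
            (fun tr => pvFragB tr.1 tr.2.1 tr.2.2 row)) := by
  induction ts generalizing g with
  | nil => simp
  | cons s rest ih =>
      rw [List.foldl_cons, List.filterMap_cons]
      by_cases hs : s.1 ∈ ctgb
      · rw [if_pos hs, pvZip_map_self, ih]
        simp [hs, List.append_assoc]
      · rw [if_neg hs, ih]
        simp [hs]

-- for nonempty parts, the concatenation of (part ++ ", ") is the join plus one trailing ", "
lemma pvFlat_eq (p : List Char) (parts : List (List Char)) :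
    ((p :: parts).map (fun q => q ++ [',', ' '])).flatten
      = PySem.Chars.join [',', ' '] (p :: parts) ++ [',', ' '] := by
  induction parts generalizing p with
  | nil => simp [PySem.Chars.join_singleton]
  | cons q rest ih =>
      have h := ih q
      simp only [List.map_cons, List.flatten_cons] at h ⊢
      rw [PySem.Chars.join_cons_cons]
      simp only [List.append_assoc] at h ⊢
      rw [h]

-- dropping the last two characters of xs ++ [a, b]
lemma pvSlice_two (xs : List Char) (a b : Char) :
    PySem.List.slice (xs ++ [a, b]) none (some (-2)) = xs := by
  simp only [PySem.List.slice, Int.reduceNeg, Order.lt_two_iff, zero_le,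
    PySem.List.clampIdx_neg_ofNat, tsub_zero, List.drop_zero]
  have h : (xs ++ [a, b]).length - 2 = xs.length := by simp
  rw [h, List.take_left]

-- the trimmed accumulator equals the join
lemma pvKey {α : Type} (f : α → List Char) (ts : List α) :
    PySem.List.slice (ts.foldl (fun r x => r ++ (f x ++ [',', ' '])) []) none (some (-2))
      = PySem.Chars.join [',', ' '] (ts.map f) := by
  have hfold : ts.foldl (fun r x => r ++ (f x ++ [',', ' '])) []
      = (ts.map (fun x => f x ++ [',', ' '])).flatten := by
    induction ts using List.reverseRecOn with
    | nil => rfl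
    | append_singleton ys y ih => simp [ih]
  have h2 : ts.map (fun x => f x ++ [',', ' '])
      = (ts.map f).map (fun q => q ++ [',', ' ']) := by simp
  rw [hfold, h2]
  rcases hm : ts.map f with _ | ⟨p, parts⟩
  · rfl
  · rw [pvFlat_eq p parts]
    exact pvSlice_two _ ',' ' '

-- one row of A equals the join of that row's fragments
lemma pvLineA_eq (ts : List (String × Option (String → String) × Nat)) (row : List String) :
    pvLineA ts row
      = String.ofList (PySem.Chars.join [',', ' ']
          (ts.map (fun tr => pvFragB tr.1 tr.2.1 tr.2.2 row))) := by
  unfold pvLineA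
  have hf : (fun (r : List Char) (tr : String × Option (String → String) × Nat) =>
        r ++ tr.1.toList ++ (pvText tr.2.1 row tr.2.2).toList ++ [',', ' '])
      = (fun r tr => r ++ (pvFragB tr.1 tr.2.1 tr.2.2 row ++ [',', ' '])) := by
    funext r tr; simp [pvFragB]
  rw [hf, pvKey (fun tr => pvFragB tr.1 tr.2.1 tr.2.2 row) ts]

-- ===== VERDICT (by name: the statement is the Claim_ definition above) =====
theorem annotate_line_spec : Claim_equal_annotate_line := by
  intro ctgb cts _ _
  unfold Spec_annotate_line annotate_line annotate_line_alt
  rw [pvFold_eq ctgb cts pvSpec (fun _ => [])]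
  rw [List.map_map]
  refine List.map_congr_left (fun row _ => ?_)
  simp only [Function.comp, List.nil_append]
  rw [pvLineA_eq, pvTrans_eq]
  rfl
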